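-- pv_equiv track=rewrite | github.com/Lackadaisica1/college-dump-sophomore | proj04_short.py | compare_back
-- ===== SOURCE A (Python) =====
-- def compare_back(linearType1, linearType2):
--     """This function compares two linear types starting from the highest index of each."""
--
--     assert type(linearType1) == type(linearType2)
--
--
--     if (len(linearType1) <= len(linearType2)):
--         indexSmaller = len(linearType1) - 1
--         indexLarger = len(linearType2) - 1
--
--         if not linearType1 or not linearType2:
--             return 0
--
--         charsSame = 0
--
--         while indexSmaller >= 0 and (linearType1[indexSmaller] == linearType2[indexLarger]):
--             if(linearType1[indexSmaller] == linearType2[indexLarger]):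
--                 charsSame += 1
--             if(indexSmaller == len(linearType1)):
--                 return len(smallerLinear)
--             indexSmaller -= 1
--             indexLarger -= 1
--
--         return charsSame
--
--     else:
--         indexSmaller = len(linearType2) - 1
--         indexLarger = len(linearType1) - 1
--
--         if not linearType1 or not linearType2:
--             return 0
--
--         charsSame = 0
--
--         while indexSmaller >= 0 and (linearType2[indexSmaller] == linearType1[indexLarger]):
--             if(linearType2[indexSmaller] == linearType1[indexLarger]):
--                 charsSame += 1
--             if(indexSmaller == len(linearType2)):
--                 return len(smallerLinear)
--             indexSmaller -= 1
--             indexLarger -= 1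
--
--         return charsSame
-- ===== SOURCE B (Python) =====
-- def compare_back(linearType1, linearType2):
--     """Binary search for the largest k such that the trailing k elements of the
--     two sequences are equal; suffix equality is monotone in k, so bisection works."""
--     assert type(linearType1) == type(linearType2)
--     lo, hi = 0, min(len(linearType1), len(linearType2))
--     while lo < hi:
--         mid = (lo + hi + 1) // 2
--         if linearType1[len(linearType1) - mid:] == linearType2[len(linearType2) - mid:]:
--             lo = mid
--         else:
--             hi = mid - 1
--     return lo
-- ===== Notes on version B (the rewrite author's own statement) =====
-- stated objective: alternative
-- what changed: Replaces A's two symmetric backward index-walking branches by a binary search on the suffix length k, testing whether the trailing k-slices are equal (suffix equality is monotone in k).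
import Mathlib
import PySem

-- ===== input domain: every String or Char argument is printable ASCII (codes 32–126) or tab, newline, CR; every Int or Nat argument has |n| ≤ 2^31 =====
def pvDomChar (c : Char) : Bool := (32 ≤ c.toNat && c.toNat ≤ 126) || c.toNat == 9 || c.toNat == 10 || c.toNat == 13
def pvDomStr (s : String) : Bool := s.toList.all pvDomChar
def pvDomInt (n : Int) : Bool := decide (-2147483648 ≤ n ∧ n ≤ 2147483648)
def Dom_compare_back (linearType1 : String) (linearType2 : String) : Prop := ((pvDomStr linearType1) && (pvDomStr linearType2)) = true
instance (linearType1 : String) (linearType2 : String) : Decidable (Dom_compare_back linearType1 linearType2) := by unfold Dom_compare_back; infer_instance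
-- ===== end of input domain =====

-- B replaces A's two symmetric backward index-walking branches by a binary search on the
-- suffix length (slice comparison as the monotone predicate); equal return values are proved
-- on all inputs.

-- ===== PORT A =====
-- A's while loop: indexSmaller/indexLarger walk backwards; fuel = initial indexSmaller + 1
-- (= length of the smaller string), which bounds the iteration count exactly.
def pvLoopA (sm lg : List Char) : Int → Int → Int → Nat → Int
  | _, _, cnt, 0 => cnt
  | iS, iL, cnt, Nat.succ f =>
    if 0 ≤ iS ∧ PySem.List.pyGet? sm iS = PySem.List.pyGet? lg iL then
      -- inner 'if(linearType1[indexSmaller] == linearType2[indexLarger]): charsSame += 1'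
      let cnt' := if PySem.List.pyGet? sm iS = PySem.List.pyGet? lg iL then cnt + 1 else cnt
      -- 'if(indexSmaller == len(...)): return len(smallerLinear)' is unreachable
      -- (indexSmaller < len throughout; 'smallerLinear' is an undefined name)
      pvLoopA sm lg (iS - 1) (iL - 1) cnt' f
    else cnt

def compare_back (linearType1 : String) (linearType2 : String) : Int :=
  if linearType1.toList.length ≤ linearType2.toList.length then
    if linearType1.toList = [] ∨ linearType2.toList = [] then 0
    else pvLoopA linearType1.toList linearType2.toList ((linearType1.toList.length : Int) - 1)
      ((linearType2.toList.length : Int) - 1) 0 linearType1.toList.length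
  else
    if linearType1.toList = [] ∨ linearType2.toList = [] then 0
    else pvLoopA linearType2.toList linearType1.toList ((linearType2.toList.length : Int) - 1)
      ((linearType1.toList.length : Int) - 1) 0 linearType2.toList.length

-- ===== PORT B =====
-- B's 'while lo < hi: mid = (lo+hi+1)//2; if a[len(a)-mid:] == b[len(b)-mid:]: lo = mid
-- else: hi = mid-1'; fuel bounds the iteration count (hi - lo shrinks every turn, so
-- min(len a, len b) + 1 turns always suffice).
def pvBS (a b : List Char) : Nat → Int → Int → Int
  | 0, lo, _ => lo
  | Nat.succ f, lo, hi =>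
    if lo < hi then
      let mid := PySem.Int.floordiv (lo + hi + 1) 2
      if PySem.List.slice a (some ((a.length : Int) - mid)) none
          = PySem.List.slice b (some ((b.length : Int) - mid)) none
      then pvBS a b f mid hi
      else pvBS a b f lo (mid - 1)
    else lo

def compare_back_alt (linearType1 : String) (linearType2 : String) : Int :=
  pvBS linearType1.toList linearType2.toList
    (min linearType1.toList.length linearType2.toList.length + 1) 0
    (min (linearType1.toList.length : Int) (linearType2.toList.length : Int))

-- ===== PRECONDITION & SPEC =====
def Spec_compare_back (linearType1 : String) (linearType2 : String) (out : Int) : Prop := out = compare_back_alt linearType1 linearType2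
instance (linearType1 : String) (linearType2 : String) (out : Int) : Decidable (Spec_compare_back linearType1 linearType2 out) := by unfold Spec_compare_back; infer_instance

-- ===== CLAIM (what is proved, stated in full; the proofs are below) =====
def Claim_equal_compare_back : Prop := ∀ (linearType1 : String) (linearType2 : String), Dom_compare_back linearType1 linearType2 → Spec_compare_back linearType1 linearType2 (compare_back linearType1 linearType2)

-- ===== LEMMAS AND PROOFS =====

-- common-prefix length: the yardstick both programs are measured against
-- (common suffix length of a and b = pvCP a.reverse b.reverse)
def pvCP : List Char → List Char → Nat
  | x :: xs, y :: ys => if x = y then pvCP xs ys + 1 else 0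
  | _, _ => 0

lemma pvCP_le : ∀ (x y : List Char), pvCP x y ≤ min x.length y.length := by
  intro x
  induction x with
  | nil => intro y; simp [pvCP]
  | cons a xs ih =>
    intro y
    cases y with
    | nil => simp [pvCP]
    | cons b ys =>
      simp only [pvCP, List.length_cons]
      split
      · have := ih ys; omega
      · omega

lemma pvCP_comm : ∀ (x y : List Char), pvCP x y = pvCP y x := by
  intro x
  induction x with
  | nil => intro y; cases y <;> rfl
  | cons a xs ih =>
    intro y
    cases y with
    | nil => rfl
    | cons b ys =>
      simp only [pvCP]
      by_cases h : a = b
      · subst h; rw [if_pos rfl, if_pos rfl, ih]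
      · rw [if_neg h, if_neg (fun hh : b = a => h hh.symm)]

-- k ≤ common-prefix length ↔ the k-prefixes agree
lemma pvCP_take : ∀ (k : Nat) (x y : List Char), k ≤ x.length → k ≤ y.length →
    (x.take k = y.take k ↔ k ≤ pvCP x y) := by
  intro k
  induction k with
  | zero => intro x y _ _; simp
  | succ k ih =>
    intro x y hx hy
    match x, y with
    | a :: xs, b :: ys =>
      simp only [List.take_succ_cons, pvCP]
      constructor
      · intro h
        have hab : a = b := (List.cons.injEq _ _ _ _ ▸ h).1
        have ht : xs.take k = ys.take k := (List.cons.injEq _ _ _ _ ▸ h).2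
        rw [if_pos hab]
        have := (ih xs ys (by simpa using hx) (by simpa using hy)).mp ht
        omega
      · intro h
        by_cases hab : a = b
        · subst hab
          rw [if_pos rfl] at h
          have := (ih xs ys (by simpa using hx) (by simpa using hy)).mpr (by omega)
          rw [this]
        · rw [if_neg hab] at h; omega

-- the slice test in B's loop is exactly 'mid ≤ common suffix length'
lemma pvSliceTest (a b : List Char) (mid : Int) (h0 : 0 < mid)
    (ha : mid ≤ (a.length : Int)) (hb : mid ≤ (b.length : Int)) :
    (PySem.List.slice a (some ((a.length : Int) - mid)) none
      = PySem.List.slice b (some ((b.length : Int) - mid)) none)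
      ↔ mid ≤ (pvCP a.reverse b.reverse : Int) := by
  rw [PySem.List.slice_from a (by omega), PySem.List.slice_from b (by omega)]
  have e1 : ((a.length : Int) - mid).toNat = a.length - mid.toNat := by omega
  have e2 : ((b.length : Int) - mid).toNat = b.length - mid.toNat := by omega
  rw [e1, e2, ← List.reverse_inj, List.reverse_drop, List.reverse_drop]
  have f1 : a.length - (a.length - mid.toNat) = mid.toNat := by omega
  have f2 : b.length - (b.length - mid.toNat) = mid.toNat := by omega
  rw [f1, f2, pvCP_take mid.toNat a.reverse b.reverse (by simpa using (by omega : mid.toNat ≤ a.length)) (by simpa using (by omega : mid.toNat ≤ b.length))]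
  omega

-- B's binary search converges to the common suffix length
lemma pvBS_eq : ∀ (f : Nat) (a b : List Char) (lo hi : Int),
    (hi - lo).toNat < f → 0 ≤ lo → lo ≤ (pvCP a.reverse b.reverse : Int) →
    (pvCP a.reverse b.reverse : Int) ≤ hi →
    hi ≤ min (a.length : Int) (b.length : Int) →
    pvBS a b f lo hi = (pvCP a.reverse b.reverse : Int) := by
  intro f
  induction f with
  | zero => intro a b lo hi hf _ _ _ _; omega
  | succ f ih =>
    intro a b lo hi hf h0 hlo hhi hmin
    by_cases h : lo < hi
    · have hmb : lo + 1 ≤ PySem.Int.floordiv ((lo + 1) + hi) 2 ∧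
          PySem.Int.floordiv ((lo + 1) + hi) 2 ≤ hi :=
        PySem.Int.floordiv_two_mid_bounds (by omega)
      have heq : lo + hi + 1 = (lo + 1) + hi := by ring
      simp only [pvBS, if_pos h, heq]
      set mid := PySem.Int.floordiv ((lo + 1) + hi) 2 with hmid
      have htest := pvSliceTest a b mid (by omega)
        (by omega) (by omega)
      split
      · rename_i hs
        exact ih a b mid hi (by omega) (by omega) (htest.mp hs) hhi hmin
      · rename_i hs
        have : ¬ mid ≤ (pvCP a.reverse b.reverse : Int) := fun hk => hs (htest.mpr hk)
        exact ih a b lo (mid - 1) (by omega) h0 hlo (by omega) (by omega)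
    · simp only [pvBS, if_neg h]
      omega

-- A's backward scan computes the common suffix length (smaller list first)
lemma pvLoopA_append (f : Nat) : ∀ (s l : List Char) (x y : Char) (iS iL cnt : Int),
    iS < s.length → iL < l.length → iS ≤ iL →
    pvLoopA (s ++ [x]) (l ++ [y]) iS iL cnt f = pvLoopA s l iS iL cnt f := by
  induction f with
  | zero => intro s l x y iS iL cnt _ _ _; rfl
  | succ f ih =>
    intro s l x y iS iL cnt hs hl hle
    by_cases h0 : 0 ≤ iS
    · have h0l : 0 ≤ iL := le_trans h0 hle
      have hgs : PySem.List.pyGet? (s ++ [x]) iS = PySem.List.pyGet? s iS := by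
        rw [PySem.List.pyGet?_of_nonneg (s ++ [x]) h0, PySem.List.pyGet?_of_nonneg s h0]
        exact List.getElem?_append_left (by omega)
      have hgl : PySem.List.pyGet? (l ++ [y]) iL = PySem.List.pyGet? l iL := by
        rw [PySem.List.pyGet?_of_nonneg (l ++ [y]) h0l, PySem.List.pyGet?_of_nonneg l h0l]
        exact List.getElem?_append_left (by omega)
      simp only [pvLoopA, hgs, hgl]
      split
      · split
        · exact ih s l x y (iS - 1) (iL - 1) (cnt + 1) (by omega) (by omega) (by omega)
        · exact ih s l x y (iS - 1) (iL - 1) cnt (by omega) (by omega) (by omega)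
      · rfl
    · simp only [pvLoopA]
      rw [if_neg (fun h => h0 h.1), if_neg (fun h => h0 h.1)]

lemma pvLoopA_eq_cp : ∀ (ra : List Char), ∀ (rb : List Char) (cnt : Int), ra.length ≤ rb.length →
    pvLoopA ra.reverse rb.reverse ((ra.length : Int) - 1) ((rb.length : Int) - 1) cnt ra.length
      = cnt + (pvCP ra rb : Int) := by
  intro ra
  induction ra with
  | nil => intro rb cnt _; simp [pvLoopA, pvCP]
  | cons x ra' ih =>
    intro rb cnt hlen
    match rb with
    | [] => simp at hlen
    | y :: rb' =>
      have hlen' : ra'.length ≤ rb'.length := by simpa using hlen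
      have e1 : (x :: ra').reverse = ra'.reverse ++ [x] := List.reverse_cons
      have e2 : (y :: rb').reverse = rb'.reverse ++ [y] := List.reverse_cons
      have e3 : (((x :: ra').length : Nat) : Int) - 1 = ((ra'.reverse.length : Nat) : Int) := by
        simp
      have e4 : (((y :: rb').length : Nat) : Int) - 1 = ((rb'.reverse.length : Nat) : Int) := by
        simp
      have e5 : (x :: ra').length = ra'.length + 1 := rfl
      rw [e1, e2, e3, e4, e5]
      have g1 : PySem.List.pyGet? (ra'.reverse ++ [x]) ((ra'.reverse.length : Nat) : Int)
          = some x := PySem.List.pyGet?_append_length ra'.reverse [] x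
      have g2 : PySem.List.pyGet? (rb'.reverse ++ [y]) ((rb'.reverse.length : Nat) : Int)
          = some y := PySem.List.pyGet?_append_length rb'.reverse [] y
      simp only [pvLoopA, g1, g2, pvCP]
      by_cases hxy : x = y
      · subst hxy
        rw [if_pos ⟨Int.natCast_nonneg _, rfl⟩, if_pos rfl, if_pos rfl]
        have a1 : ((ra'.reverse.length : Nat) : Int) - 1 = ((ra'.length : Nat) : Int) - 1 := by
          simp
        have a2 : ((rb'.reverse.length : Nat) : Int) - 1 = ((rb'.length : Nat) : Int) - 1 := by
          simp
        rw [a1, a2,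
          pvLoopA_append ra'.length ra'.reverse rb'.reverse x x _ _ (cnt + 1)
            (by simp) (by simp) (by omega)]
        rw [ih rb' (cnt + 1) hlen']
        push_cast
        ring
      · rw [if_neg (fun h => hxy (Option.some.inj h.2)), if_neg hxy]
        simp

-- A's branch body equals the common suffix length (smaller-first orientation)
lemma pvMainA (a b : List Char) (h : a.length ≤ b.length) :
    (if a = [] ∨ b = [] then (0 : Int)
     else pvLoopA a b ((a.length : Int) - 1) ((b.length : Int) - 1) 0 a.length)
      = (pvCP a.reverse b.reverse : Int) := by
  by_cases he : a = [] ∨ b = []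
  · rw [if_pos he]
    rcases he with he | he <;> subst he <;> simp [pvCP]
  · rw [if_neg he]
    have := pvLoopA_eq_cp a.reverse b.reverse 0 (by simpa using h)
    simpa using this

-- B equals the common suffix length
lemma pvMainB (l1 l2 : String) :
    compare_back_alt l1 l2 = (pvCP l1.toList.reverse l2.toList.reverse : Int) := by
  unfold compare_back_alt
  have hle := pvCP_le l1.toList.reverse l2.toList.reverse
  simp only [List.length_reverse] at hle
  apply pvBS_eq
  · omega
  · omega
  · exact Int.natCast_nonneg _
  · omega
  · omega

-- ===== VERDICT (by name: the statement is the Claim_ definition above) =====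
theorem compare_back_spec : Claim_equal_compare_back := by
  intro l1 l2 _
  unfold Spec_compare_back
  rw [pvMainB]
  unfold compare_back
  by_cases h : l1.toList.length ≤ l2.toList.length
  · rw [if_pos h]
    exact pvMainA l1.toList l2.toList h
  · rw [if_neg h, pvCP_comm]
    have := pvMainA l2.toList l1.toList (by omega)
    rw [← this]
    exact if_congr or_comm rfl rfl
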